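-- pv_equiv track=rewrite | github.com/the-zebulan/CodeWars | katas/kyu_5/reversi_row_rudiments.py | reversi_row
-- ===== SOURCE A (Python) =====
-- from itertools import cycle
--
-- def reversi_row(moves):
--     row = ['.'] * 8
--     player = cycle('*O')
--     for move in moves:
--         current_player = next(player)
--         invalid = {'.', current_player}
--         row[move] = current_player
--         row_str = ''.join(row)
--         # look left
--         first_left = row_str.rfind(current_player, 0, move)
--         if first_left != -1:
--             # flip to the left
--             left_chunk = row_str[first_left + 1:move]
--             if not invalid.intersection(left_chunk):
--                 row[first_left + 1:move] = [current_player] * len(left_chunk)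
--         # look right
--         first_right = row_str.find(current_player, move + 1)
--         if first_right != -1:
--             # flip to the right
--             right_chunk = row_str[move + 1:first_right]
--             if not invalid.intersection(right_chunk):
--                 row[move + 1:first_right] = [current_player] * len(right_chunk)
--     return ''.join(row)
-- ===== SOURCE B (Python) =====
-- def reversi_row(moves):
--     row = ['.'] * 8
--     for i, move in enumerate(moves):
--         me = '*O'[i % 2]
--         row[move] = me
--         # walk left over opponent pieces; flip them iff we stop on our own piece
--         j = move - 1
--         while j >= 0 and row[j] != '.' and row[j] != me:
--             j -= 1
--         if j >= 0 and row[j] == me: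
--             for k in range(j + 1, move):
--                 row[k] = me
--         # walk right over opponent pieces; flip them iff we stop on our own piece
--         j = move + 1
--         while j < 8 and row[j] != '.' and row[j] != me:
--             j += 1
--         if j < 8 and row[j] == me:
--             for k in range(move + 1, j):
--                 row[k] = me
--     return ''.join(row)
-- ===== Notes on version B (the rewrite author's own statement) =====
-- stated objective: alternative
-- what changed: A rebuilds the row as a string each move and uses rfind/find plus a slice set-intersection test and slice assignment; B never builds a string and instead walks outward cell by cell from the placed piece in each direction, flipping the traversed opponent run only if the walk stops on the current player's piece.
-- outside the precondition, e.g. on reversi_row([0, 1, -6]): A returns '***.....', B returns '*O*.....'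
import Mathlib
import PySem

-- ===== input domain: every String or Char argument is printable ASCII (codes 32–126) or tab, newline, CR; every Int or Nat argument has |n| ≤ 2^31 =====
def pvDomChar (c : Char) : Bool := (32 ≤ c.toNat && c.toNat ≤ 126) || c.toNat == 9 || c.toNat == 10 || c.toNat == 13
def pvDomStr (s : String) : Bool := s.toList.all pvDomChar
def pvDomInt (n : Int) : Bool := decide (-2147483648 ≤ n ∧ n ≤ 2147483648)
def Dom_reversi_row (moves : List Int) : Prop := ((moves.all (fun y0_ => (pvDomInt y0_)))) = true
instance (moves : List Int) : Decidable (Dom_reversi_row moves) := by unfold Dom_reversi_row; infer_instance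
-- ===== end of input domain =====

-- B replaces A's per-move string building + rfind/find + slice-intersection test by a direct
-- outward cell-by-cell walk in each direction (objective: alternative formulation, same cost).

-- ===== PORT A =====
-- row[a:b] = vals; exact for 0 ≤ a ≤ b ≤ len(row) with vals.length = b - a,
-- which is the only case A's slice assignments reach under Pre_.
def pvSetSlice (row : List Char) (a b : Int) (vals : List Char) : List Char :=
  row.take a.toNat ++ vals ++ row.drop b.toNat

-- one iteration of A's loop body (current_player = cp)
def pvStepA (row0 : List Char) (cp : Char) (move : Int) : List Char :=
  let row := PySem.List.pySetD row0 move cp            -- row[move] = current_player (in range under Pre_)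
  let rowStr := row                                    -- row_str = ''.join(row): its characters
  let firstLeft := PySem.Chars.rfindFrom rowStr [cp] 0 (some move)
  let row1 :=
    if firstLeft ≠ -1 then
      let leftChunk := PySem.Chars.slice rowStr (some (firstLeft + 1)) (some move)
      if leftChunk.all (fun c => !(c == '.' || c == cp)) then  -- not invalid.intersection(left_chunk)
        pvSetSlice row (firstLeft + 1) move (List.replicate leftChunk.length cp)
      else row
    else row
  let firstRight := PySem.Chars.findFrom rowStr [cp] (move + 1) none
  if firstRight ≠ -1 then
    let rightChunk := PySem.Chars.slice rowStr (some (move + 1)) (some firstRight)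
    if rightChunk.all (fun c => !(c == '.' || c == cp)) then
      pvSetSlice row1 (move + 1) firstRight (List.replicate rightChunk.length cp)
    else row1
  else row1

def reversi_row (moves : List Int) : String :=
  -- player = cycle('*O'); next(player) alternates '*','O' — tracked by a counter
  let st := moves.foldl
    (fun (st : List Char × Nat) move =>
      (pvStepA st.1 (if st.2 % 2 == 0 then '*' else 'O') move, st.2 + 1))
    (List.replicate 8 '.', 0)
  String.ofList st.1                                       -- return ''.join(row)

-- ===== PORT B =====
-- walk left from index m-1 while on opponent cells; result = stop index (or -1 at the boundary)
def pvWalkL (row : List Char) (cp : Char) : Nat → Int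
  | 0 => -1
  | j + 1 =>
    if row.getD j '.' == '.' || row.getD j '.' == cp then (j : Int)
    else pvWalkL row cp j

-- walk right from index j with fuel = 8 - j while on opponent cells; result = stop index (or 8)
def pvWalkR (row : List Char) (cp : Char) : Nat → Nat → Nat
  | j, 0 => j
  | j, f + 1 =>
    if row.getD j '.' == '.' || row.getD j '.' == cp then j
    else pvWalkR row cp (j + 1) f

-- for k in range(a, b): row[k] = cp
def pvFlip (row : List Char) (cp : Char) (a b : Int) : List Char :=
  (PySem.List.pyRange a b 1).foldl (fun r k => PySem.List.pySetD r k cp) row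

-- one iteration of B's loop body (me = cp)
def pvStepB (row0 : List Char) (cp : Char) (move : Int) : List Char :=
  let row := PySem.List.pySetD row0 move cp
  let m := move.toNat                                  -- Pre_ guarantees 0 ≤ move < 8
  let jL := pvWalkL row cp m
  let row1 := if jL ≥ 0 && (row.getD jL.toNat '.' == cp) then pvFlip row cp (jL + 1) move else row
  let jR := pvWalkR row1 cp (m + 1) (8 - (m + 1))
  if jR < 8 && (row1.getD jR '.' == cp) then pvFlip row1 cp (move + 1) (jR : Int)
  else row1

def reversi_row_alt (moves : List Int) : String :=
  String.ofList ((PySem.List.enumerate moves).foldl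
    (fun row p => pvStepB row (if p.1 % 2 == 0 then '*' else 'O') p.2)
    (List.replicate 8 '.'))

-- ===== PRECONDITION & SPEC =====
-- Pre_ restricts to the puzzle's natural domain of board indices 0..7: A raises IndexError for a
-- move outside [-8, 8), and for -8 ≤ move < 0 A's value arises from Python's negative-index
-- wraparound (outside the kata's domain), which B does not reproduce.
def Pre_reversi_row (moves : List Int) : Prop := ∀ m ∈ moves, 0 ≤ m ∧ m < 8
instance (moves : List Int) : Decidable (Pre_reversi_row moves) := by
  unfold Pre_reversi_row; infer_instance

def pvWitness_reversi_row : List Int := [4, 3, 5, 2, 6]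

def Spec_reversi_row (moves : List Int) (out : String) : Prop := out = reversi_row_alt moves
instance (moves : List Int) (out : String) : Decidable (Spec_reversi_row moves out) := by
  unfold Spec_reversi_row; infer_instance

-- ===== CLAIM (what is proved, stated in full; the proofs are below) =====
def Claim_equal_reversi_row : Prop := ∀ (moves : List Int), Dom_reversi_row moves → Pre_reversi_row moves → Spec_reversi_row moves (reversi_row moves)

-- ===== LEMMAS AND PROOFS =====

-- "opponent cell" relative to player cp
def pvOpp (cp c : Char) : Prop := ¬(c = '.' ∨ c = cp)

-- proof-side decompositions of the two step bodies
def pvLeftA (r : List Char) (cp : Char) (m : Nat) : List Char :=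
  if PySem.Chars.rfindFrom r [cp] 0 (some (m:Int)) ≠ -1 then
    if (PySem.Chars.slice r (some (PySem.Chars.rfindFrom r [cp] 0 (some (m:Int)) + 1)) (some (m:Int))).all
        (fun c => !(c == '.' || c == cp)) then
      pvSetSlice r (PySem.Chars.rfindFrom r [cp] 0 (some (m:Int)) + 1) (m:Int)
        (List.replicate (PySem.Chars.slice r (some (PySem.Chars.rfindFrom r [cp] 0 (some (m:Int)) + 1)) (some (m:Int))).length cp)
    else r
  else r

def pvRightA (r rowL : List Char) (cp : Char) (m : Nat) : List Char :=
  if PySem.Chars.findFrom r [cp] ((m:Int) + 1) none ≠ -1 then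
    if (PySem.Chars.slice r (some ((m:Int) + 1)) (some (PySem.Chars.findFrom r [cp] ((m:Int) + 1) none))).all
        (fun c => !(c == '.' || c == cp)) then
      pvSetSlice rowL ((m:Int) + 1) (PySem.Chars.findFrom r [cp] ((m:Int) + 1) none)
        (List.replicate (PySem.Chars.slice r (some ((m:Int) + 1)) (some (PySem.Chars.findFrom r [cp] ((m:Int) + 1) none))).length cp)
    else rowL
  else rowL

def pvLeftB (r : List Char) (cp : Char) (m : Nat) : List Char :=
  if pvWalkL r cp m ≥ 0 && (r.getD (pvWalkL r cp m).toNat '.' == cp) then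
    pvFlip r cp (pvWalkL r cp m + 1) (m:Int)
  else r

def pvRightB (rowL : List Char) (cp : Char) (m : Nat) : List Char :=
  if pvWalkR rowL cp (m + 1) (8 - (m + 1)) < 8 && (rowL.getD (pvWalkR rowL cp (m + 1) (8 - (m + 1))) '.' == cp) then
    pvFlip rowL cp ((m:Int) + 1) ((pvWalkR rowL cp (m + 1) (8 - (m + 1)) : Nat) : Int)
  else rowL

theorem stepA_decomp (row : List Char) (cp : Char) (m : Nat) :
    pvStepA row cp (m:Int) = pvRightA (row.set m cp) (pvLeftA (row.set m cp) cp m) cp m := by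
  simp only [pvStepA, pvLeftA, pvRightA, PySem.List.pySetD_natCast]

theorem stepB_decomp (row : List Char) (cp : Char) (m : Nat) :
    pvStepB row cp (m:Int) = pvRightB (pvLeftB (row.set m cp) cp m) cp m := by
  simp only [pvStepB, pvLeftB, pvRightB, PySem.List.pySetD_natCast, Int.toNat_natCast]
  rfl

theorem pvOpp_bool (cp c : Char) : ((c == '.' || c == cp) = true) ↔ ¬ pvOpp cp c := by
  simp [pvOpp]; tauto

theorem pvOpp_bool_false (cp c : Char) (h : pvOpp cp c) : (c == '.' || c == cp) = false := by
  rw [← Bool.not_eq_true]; intro hb; exact (pvOpp_bool cp c).mp hb h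

theorem pvOpp_of_not_beq (cp c : Char) (h : (c == '.' || c == cp) = false) : pvOpp cp c := by
  intro hor
  rcases hor with h1 | h1 <;> simp [h1] at h

theorem prefix_singleton {cp : Char} {l : List Char} : [cp] <+: l ↔ l.head? = some cp := by
  cases l with
  | nil => simp
  | cons a t => simp [List.cons_prefix_cons, eq_comm]

theorem prefix_singleton_drop {cp : Char} {s : List Char} {i : Nat} :
    [cp] <+: s.drop i ↔ s[i]? = some cp := by
  rw [prefix_singleton, List.head?_drop]

theorem isPrefixOf_singleton_drop (cp : Char) (s : List Char) (i : Nat) :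
    ([cp].isPrefixOf (s.drop i)) = decide (s[i]? = some cp) := by
  by_cases h : s[i]? = some cp
  · simp [h, List.isPrefixOf_iff_prefix, prefix_singleton_drop]
  · have hnp : ¬ [cp] <+: s.drop i := fun hp => h (prefix_singleton_drop.mp hp)
    simp only [h, decide_false]
    rw [← Bool.not_eq_true, List.isPrefixOf_iff_prefix]
    exact hnp

theorem rfind_go_spec (s : List Char) (cp : Char) : ∀ j : Nat,
    (PySem.Chars.rfind.go s [cp] j = -1 ∧ ∀ i : Nat, i ≤ j → s[i]? ≠ some cp)
  ∨ (∃ f : Nat, PySem.Chars.rfind.go s [cp] j = (f : Int) ∧ f ≤ j ∧ s[f]? = some cp ∧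
      ∀ i : Nat, f < i → i ≤ j → s[i]? ≠ some cp)
  | 0 => by
    by_cases h : s[0]? = some cp
    · right
      refine ⟨0, ?_, le_refl 0, h, by omega⟩
      show (if [cp].isPrefixOf s then (0:Int) else -1) = 0
      rw [show s = s.drop 0 from rfl, isPrefixOf_singleton_drop]
      simp [h]
    · left
      constructor
      · show (if [cp].isPrefixOf s then (0:Int) else -1) = -1
        rw [show s = s.drop 0 from rfl, isPrefixOf_singleton_drop]
        simp [h]
      · intro i hi
        interval_cases i
        exact h
  | j + 1 => by
    have IH := rfind_go_spec s cp j
    by_cases h : s[j+1]? = some cp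
    · right
      refine ⟨j + 1, ?_, le_refl _, h, by omega⟩
      show (if [cp].isPrefixOf (s.drop (j+1)) then ((j:Int) + 1) else PySem.Chars.rfind.go s [cp] j) = ((j + 1 : Nat) : Int)
      rw [isPrefixOf_singleton_drop]
      simp [h]
    · have hg : PySem.Chars.rfind.go s [cp] (j + 1) = PySem.Chars.rfind.go s [cp] j := by
        show (if [cp].isPrefixOf (s.drop (j+1)) then ((j:Int) + 1) else PySem.Chars.rfind.go s [cp] j) = _
        rw [isPrefixOf_singleton_drop]
        simp [h]
      rcases IH with ⟨h1, h2⟩ | ⟨f, h1, h2, h3, h4⟩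
      · left
        refine ⟨hg.trans h1, fun i hi => ?_⟩
        rcases Nat.lt_or_ge i (j + 1) with hlt | hge
        · exact h2 i (by omega)
        · have : i = j + 1 := by omega
          subst this; exact h
      · right
        refine ⟨f, hg.trans h1, by omega, h3, fun i hi1 hi2 => ?_⟩
        rcases Nat.lt_or_ge i (j + 1) with hlt | hge
        · exact h4 i hi1 (by omega)
        · have : i = j + 1 := by omega
          subst this; exact h

theorem rfind_spec (s : List Char) (cp : Char) :
    (PySem.Chars.rfind s [cp] = -1 ∧ ∀ i : Nat, s[i]? ≠ some cp)
  ∨ (∃ f : Nat, PySem.Chars.rfind s [cp] = (f : Int) ∧ s[f]? = some cp ∧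
      ∀ i : Nat, f < i → s[i]? ≠ some cp) := by
  have h := rfind_go_spec s cp s.length
  have hout : ∀ i : Nat, s.length < i → s[i]? ≠ some cp := by
    intro i hi hsome
    obtain ⟨hlt, -⟩ := List.getElem?_eq_some_iff.mp hsome
    omega
  rcases h with ⟨h1, h2⟩ | ⟨f, h1, h2, h3, h4⟩
  · left
    refine ⟨h1, fun i => ?_⟩
    rcases Nat.lt_or_ge s.length i with hlt | hge
    · exact hout i hlt
    · exact h2 i hge
  · right
    refine ⟨f, h1, h3, fun i hi => ?_⟩
    rcases Nat.lt_or_ge s.length i with hlt | hge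
    · exact hout i hlt
    · exact h4 i hi hge

theorem rfindFrom_take (s : List Char) (cp : Char) (m : Nat) (hm : m ≤ s.length) :
    PySem.Chars.rfindFrom s [cp] 0 (some (m:Int)) = PySem.Chars.rfind (s.take m) [cp] := by
  unfold PySem.Chars.rfindFrom
  have h1 : ¬((s.length : Int) < (m : Int)) := by exact_mod_cast Nat.not_lt.mpr hm
  have h2 : ¬((m : Int) < 0) := by omega
  simp only [h1, if_false, h2, lt_irrefl, Int.toNat_natCast]
  rw [Int.toNat_zero, List.drop_zero]
  rcases eq_or_ne (PySem.Chars.rfind (List.take m s) [cp]) (-1) with he | he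
  · simp [he]
  · simp [he]

theorem pvWalkL_unfold (row : List Char) (cp : Char) (m : Nat) :
    pvWalkL row cp (m + 1) =
      if (row.getD m '.' == '.' || row.getD m '.' == cp) = true then ((m : Nat) : Int)
      else pvWalkL row cp m := rfl

theorem pvWalkL_spec (row : List Char) (cp : Char) : ∀ m : Nat,
    (pvWalkL row cp m = -1 ∧ ∀ i : Nat, i < m → pvOpp cp (row.getD i '.'))
  ∨ (∃ j : Nat, pvWalkL row cp m = (j:Int) ∧ j < m ∧ ¬ pvOpp cp (row.getD j '.') ∧
      ∀ i : Nat, j < i → i < m → pvOpp cp (row.getD i '.'))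
  | 0 => Or.inl ⟨rfl, by omega⟩
  | m + 1 => by
    by_cases hop : pvOpp cp (row.getD m '.')
    · have hb := pvOpp_bool_false cp _ hop
      have hg : pvWalkL row cp (m + 1) = pvWalkL row cp m := by
        rw [pvWalkL_unfold, hb]; simp
      rcases pvWalkL_spec row cp m with ⟨h1, h2⟩ | ⟨j, h1, h2, h3, h4⟩
      · left
        refine ⟨hg.trans h1, fun i hi => ?_⟩
        rcases Nat.lt_or_ge i m with hlt | hge
        · exact h2 i hlt
        · have : i = m := by omega
          subst this; exact hop
      · right
        refine ⟨j, hg.trans h1, by omega, h3, fun i hi1 hi2 => ?_⟩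
        rcases Nat.lt_or_ge i m with hlt | hge
        · exact h4 i hi1 hlt
        · have : i = m := by omega
          subst this; exact hop
    · right
      have hb : (row.getD m '.' == '.' || row.getD m '.' == cp) = true := (pvOpp_bool cp _).mpr hop
      refine ⟨m, ?_, by omega, hop, by omega⟩
      rw [pvWalkL_unfold, hb]; simp

theorem pvWalkR_unfold (row : List Char) (cp : Char) (j f : Nat) :
    pvWalkR row cp j (f + 1) =
      if (row.getD j '.' == '.' || row.getD j '.' == cp) = true then j
      else pvWalkR row cp (j + 1) f := rfl

theorem pvWalkR_spec (row : List Char) (cp : Char) : ∀ f j : Nat,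
    (pvWalkR row cp j f = j + f ∧ ∀ i : Nat, j ≤ i → i < j + f → pvOpp cp (row.getD i '.'))
  ∨ (∃ k : Nat, pvWalkR row cp j f = k ∧ j ≤ k ∧ k < j + f ∧ ¬ pvOpp cp (row.getD k '.') ∧
      ∀ i : Nat, j ≤ i → i < k → pvOpp cp (row.getD i '.'))
  | 0, j => Or.inl ⟨rfl, by omega⟩
  | f + 1, j => by
    by_cases hop : pvOpp cp (row.getD j '.')
    · have hb := pvOpp_bool_false cp _ hop
      have hg : pvWalkR row cp j (f + 1) = pvWalkR row cp (j + 1) f := by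
        rw [pvWalkR_unfold, hb]; simp
      rcases pvWalkR_spec row cp f (j + 1) with ⟨h1, h2⟩ | ⟨k, h1, h2, h3, h4, h5⟩
      · left
        constructor
        · rw [hg, h1]; omega
        · intro i hi1 hi2
          rcases Nat.lt_or_ge i (j + 1) with hlt | hge
          · have : i = j := by omega
            subst this; exact hop
          · exact h2 i hge (by omega)
      · right
        refine ⟨k, hg.trans h1, by omega, by omega, h4, fun i hi1 hi2 => ?_⟩
        rcases Nat.lt_or_ge i (j + 1) with hlt | hge
        · have : i = j := by omega
          subst this; exact hop
        · exact h5 i hge hi2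
    · right
      have hb : (row.getD j '.' == '.' || row.getD j '.' == cp) = true := (pvOpp_bool cp _).mpr hop
      refine ⟨j, ?_, le_refl j, by omega, hop, by omega⟩
      rw [pvWalkR_unfold, hb]; simp

theorem pvWalkR_congr (r1 r2 : List Char) (cp : Char) : ∀ f j : Nat,
    (∀ i : Nat, j ≤ i → r1.getD i '.' = r2.getD i '.') →
    pvWalkR r1 cp j f = pvWalkR r2 cp j f
  | 0, j, _ => rfl
  | f + 1, j, h => by
    rw [pvWalkR_unfold, pvWalkR_unfold, h j (le_refl j)]
    split
    · rfl
    · exact pvWalkR_congr r1 r2 cp f (j + 1) (fun i hi => h i (by omega))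

theorem getD_of_drop_eq {l1 l2 : List Char} {m i : Nat} (h : l1.drop m = l2.drop m) (hi : m ≤ i) (d : Char) :
    l1.getD i d = l2.getD i d := by
  have h1 : l1[i]? = l2[i]? := by
    have h2 := congrArg (fun l => l[i - m]?) h
    simpa [List.getElem?_drop, Nat.add_sub_cancel' hi] using h2
  simp [List.getD_eq_getElem?_getD, h1]

theorem drop_prefix_len {p s : List Char} {m : Nat} (hp : p.length = m) : (p ++ s).drop m = s := by
  rw [← hp, List.drop_left]

theorem pvFlip_eq (cp : Char) : ∀ (t a : Nat) (r : List Char), a + t ≤ r.length →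
    pvFlip r cp (a : Int) ((a + t : Nat) : Int) = r.take a ++ List.replicate t cp ++ r.drop (a + t)
  | 0, a, r => by
    intro h
    have he : PySem.List.pyRange (a : Int) ((a + 0 : Nat) : Int) 1 = [] := by
      unfold PySem.List.pyRange
      simp
    unfold pvFlip
    rw [he]
    simp
  | t + 1, a, r => by
    intro h
    have hlt : (a : Int) < ((a + (t + 1) : Nat) : Int) := by push_cast; omega
    have hcons := PySem.List.pyRange_one_cons hlt
    unfold pvFlip
    rw [hcons]
    simp only [List.foldl_cons, PySem.List.pySetD_natCast]
    have ha1 : ((a : Int) + 1) = ((a + 1 : Nat) : Int) := by push_cast; ring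
    have hb : ((a + (t + 1) : Nat) : Int) = (((a + 1) + t : Nat) : Int) := by push_cast; ring
    rw [ha1, hb]
    have hIH := pvFlip_eq cp t (a + 1) (r.set a cp) (by simp; omega)
    unfold pvFlip at hIH
    rw [hIH]
    have haln : a < r.length := by omega
    have htake : (r.set a cp).take (a + 1) = r.take a ++ [cp] := by
      rw [List.take_set, List.take_add_one, List.getElem?_eq_getElem haln]
      rw [List.set_append]
      simp [List.length_take, Nat.min_eq_left (by omega : a ≤ r.length)]
    have hdrop : (r.set a cp).drop (a + 1 + t) = r.drop (a + (t + 1)) := by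
      rw [List.drop_set, if_pos (by omega)]
      congr 1; omega
    rw [htake, hdrop]
    simp [List.replicate_succ, List.append_assoc]

theorem pvFlip_length (r : List Char) (cp : Char) (a b : Int) :
    (pvFlip r cp a b).length = r.length := by
  unfold pvFlip
  generalize PySem.List.pyRange a b 1 = ks
  induction ks generalizing r with
  | nil => rfl
  | cons k ks ih => simp [List.foldl_cons, ih, PySem.List.length_pySetD]

theorem getD_getElem?_some (r : List Char) (i : Nat) (hi : i < r.length) :
    r[i]? = some (r.getD i '.') := by
  rw [List.getD_eq_getElem r '.' hi, List.getElem?_eq_getElem hi]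

theorem all_opp_iff (r : List Char) (cp : Char) (a t : Nat) (h : a + t ≤ r.length) :
    (((r.drop a).take t).all (fun c => !(c == '.' || c == cp)) = true) ↔
    (∀ i : Nat, a ≤ i → i < a + t → pvOpp cp (r.getD i '.')) := by
  rw [List.all_eq_true]
  constructor
  · intro hall i h1 h2
    have hi : i < r.length := by omega
    have hmem : r[i] ∈ (r.drop a).take t := by
      have hidx : a + (i - a) = i := by omega
      have hsome : ((r.drop a).take t)[i - a]? = some r[i] := by
        rw [List.getElem?_take, if_pos (by omega : i - a < t), List.getElem?_drop, hidx,
          List.getElem?_eq_getElem hi]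
      exact List.mem_of_getElem? hsome
    have hb := hall _ hmem
    rw [Bool.not_eq_eq_eq_not, Bool.not_true] at hb
    rw [List.getD_eq_getElem r '.' hi]
    exact pvOpp_of_not_beq cp _ hb
  · intro hp c hc
    rw [List.mem_iff_getElem] at hc
    obtain ⟨i, hilt, rfl⟩ := hc
    have hlt : i < t := by
      have := hilt
      simp only [List.length_take, List.length_drop] at this
      omega
    have hia : a + i < r.length := by omega
    have helem : ((r.drop a).take t)[i]'hilt = r[a + i]'hia := by
      rw [List.getElem_take, List.getElem_drop]
    rw [helem, Bool.not_eq_eq_eq_not, Bool.not_true]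
    have hopp := hp (a + i) (by omega) (by omega)
    rw [List.getD_eq_getElem r '.' hia] at hopp
    exact pvOpp_bool_false cp _ hopp

-- ===== left side =====
theorem left_main (r : List Char) (cp : Char) (m : Nat) (hlen : r.length = 8) (hm : m ≤ 8) :
    pvLeftA r cp m = pvLeftB r cp m ∧ (pvLeftB r cp m).drop m = r.drop m ∧ (pvLeftB r cp m).length = 8 := by
  have hmle : m ≤ r.length := by omega
  have hrf := rfindFrom_take r cp m hmle
  have htklen : (r.take m).length = m := by simp [List.length_take]; omega
  have hgetTake : ∀ i : Nat, i < m → (r.take m)[i]? = some (r.getD i '.') := by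
    intro i hi
    rw [List.getElem?_take, if_pos hi, getD_getElem?_some r i (by omega)]
  rcases pvWalkL_spec r cp m with ⟨hw, hall⟩ | ⟨j, hw, hjm, hstop, hall⟩
  · -- boundary: whole prefix is opponent cells, neither side flips
    have hA : PySem.Chars.rfind (r.take m) [cp] = -1 := by
      rcases rfind_spec (r.take m) cp with ⟨h1, _⟩ | ⟨f, h1, h2, _⟩
      · exact h1
      · exfalso
        obtain ⟨hlt, -⟩ := List.getElem?_eq_some_iff.mp h2
        have hfm : f < m := by omega
        rw [hgetTake f hfm] at h2
        have hcp : r.getD f '.' = cp := by injection h2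
        exact (hall f hfm) (Or.inr hcp)
    refine ⟨?_, ?_, ?_⟩
    · simp [pvLeftA, pvLeftB, hrf, hA, hw]
    · simp [pvLeftB, hw]
    · simp [pvLeftB, hw, hlen]
  · have hj8 : j < 8 := by omega
    have hcget : r[j]? = some (r.getD j '.') := getD_getElem?_some r j (by omega)
    by_cases hc : r.getD j '.' = cp
    · -- the walk stopped on the player's own piece: both sides flip (j, m)
      have hA : PySem.Chars.rfind (r.take m) [cp] = (j : Int) := by
        rcases rfind_spec (r.take m) cp with ⟨h1, h2⟩ | ⟨f, h1, h2, h3⟩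
        · exact absurd ((hgetTake j hjm).trans (by rw [hc])) (h2 j)
        · obtain ⟨hlt, -⟩ := List.getElem?_eq_some_iff.mp h2
          have hfm : f < m := by omega
          have hfj : f = j := by
            rcases Nat.lt_trichotomy f j with hlt2 | heq | hgt
            · exact absurd ((hgetTake j hjm).trans (by rw [hc])) (h3 j hlt2)
            · exact heq
            · exfalso
              rw [hgetTake f hfm] at h2
              have hcp : r.getD f '.' = cp := by injection h2
              exact (hall f hgt hfm) (Or.inr hcp)
          rw [hfj] at h1; exact h1
      have hchunk : PySem.Chars.slice r (some ((j:Int) + 1)) (some (m:Int)) = (r.drop (j+1)).take (m - (j+1)) := by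
        have hcast : ((j:Int) + 1) = ((j + 1 : Nat) : Int) := by push_cast; ring
        rw [hcast, PySem.Chars.slice_eq_listSlice, PySem.List.slice_natCast]
      have hallopp : (((r.drop (j+1)).take (m - (j+1))).all (fun c => !(c == '.' || c == cp))) = true := by
        rw [all_opp_iff r cp (j+1) (m - (j+1)) (by omega)]
        intro i h1 h2
        exact hall i (by omega) (by omega)
      have hclen : ((r.drop (j+1)).take (m - (j+1))).length = m - (j+1) := by
        simp only [List.length_take, List.length_drop]
        omega
      have hc' : r[j]?.getD '.' = cp := by rw [← List.getD_eq_getElem?_getD]; exact hc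
      have hBguard : ((pvWalkL r cp m ≥ 0 : Bool) && (r.getD (pvWalkL r cp m).toNat '.' == cp)) = true := by
        rw [hw]
        simp [Int.toNat_natCast, hc']
      have hAval : pvSetSlice r ((j:Int) + 1) (m:Int) (List.replicate (m - (j+1)) cp)
          = r.take (j+1) ++ List.replicate (m - (j+1)) cp ++ r.drop m := by
        unfold pvSetSlice
        have h1 : ((j:Int) + 1).toNat = j + 1 := by omega
        have h2 : ((m:Nat) : Int).toNat = m := by omega
        rw [h1, h2]
      have hBval : pvFlip r cp ((j:Int) + 1) (m:Int)
          = r.take (j+1) ++ List.replicate (m - (j+1)) cp ++ r.drop m := by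
        have h1 : ((j:Int) + 1) = ((j + 1 : Nat) : Int) := by push_cast; ring
        have h2 : ((m:Nat) : Int) = (((j+1) + (m - (j+1)) : Nat) : Int) := by push_cast; omega
        rw [h1, h2, pvFlip_eq cp (m - (j+1)) (j+1) r (by omega)]
        have h3 : (j + 1) + (m - (j + 1)) = m := by omega
        rw [h3]
      have hres : pvLeftB r cp m = r.take (j+1) ++ List.replicate (m - (j+1)) cp ++ r.drop m := by
        rw [pvLeftB]
        simp only [hBguard, if_true]
        rw [hw, hBval]
      have hpre : (r.take (j+1) ++ List.replicate (m - (j+1)) cp).length = m := by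
        simp only [List.length_append, List.length_take, List.length_replicate]
        omega
      refine ⟨?_, ?_, ?_⟩
      · rw [hres, pvLeftA, hrf, hA]
        rw [if_pos (by omega : ¬((j:Int) = -1)) ]
        rw [hchunk]
        rw [if_pos hallopp, hclen, hAval]
      · rw [hres, drop_prefix_len hpre]
      · rw [hres]
        simp only [List.length_append, List.length_take, List.length_replicate, List.length_drop]
        omega
    · -- the walk stopped on an empty cell: neither side flips
      have hor : r.getD j '.' = '.' ∨ r.getD j '.' = cp := Decidable.not_not.mp hstop
      have hdot : r.getD j '.' = '.' := by
        rcases hor with h1 | h1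
        · exact h1
        · exact absurd h1 hc
      have hne : ¬('.' = cp) := by
        intro hcc
        exact hc (hdot.trans hcc)
      have hd' : r[j]?.getD '.' = '.' := by rw [← List.getD_eq_getElem?_getD]; exact hdot
      have hBguard : ((pvWalkL r cp m ≥ 0 : Bool) && (r.getD (pvWalkL r cp m).toNat '.' == cp)) = false := by
        rw [hw]
        simp [Int.toNat_natCast, hd', hne]
      have hBv : pvLeftB r cp m = r := by
        rw [pvLeftB]
        simp only [hBguard]
        simp
      refine ⟨?_, by rw [hBv], by rw [hBv, hlen]⟩
      rw [hBv, pvLeftA, hrf]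
      rcases rfind_spec (r.take m) cp with ⟨h1, h2⟩ | ⟨f, h1, h2, h3⟩
      · rw [h1]; simp
      · obtain ⟨hlt, -⟩ := List.getElem?_eq_some_iff.mp h2
        have hfm : f < m := by omega
        have hfj : f < j := by
          rcases Nat.lt_trichotomy f j with hlt2 | heq | hgt
          · exact hlt2
          · exfalso
            subst heq
            rw [hgetTake f hfm] at h2
            have hcp : r.getD f '.' = cp := by injection h2
            exact hc hcp
          · exfalso
            rw [hgetTake f hfm] at h2
            have hcp : r.getD f '.' = cp := by injection h2
            exact (hall f hgt hfm) (Or.inr hcp)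
        have hchunk : PySem.Chars.slice r (some ((f:Int) + 1)) (some (m:Int)) = (r.drop (f+1)).take (m - (f+1)) := by
          have hcast : ((f:Int) + 1) = ((f + 1 : Nat) : Int) := by push_cast; ring
          rw [hcast, PySem.Chars.slice_eq_listSlice, PySem.List.slice_natCast]
        have hfalse : (((r.drop (f+1)).take (m - (f+1))).all (fun c => !(c == '.' || c == cp))) = false := by
          rw [← Bool.not_eq_true]
          intro htrue
          rw [all_opp_iff r cp (f+1) (m - (f+1)) (by omega)] at htrue
          exact (htrue j (by omega) (by omega)) (Or.inl hdot)
        rw [h1, if_pos (by omega : ¬((f:Int) = -1)), hchunk, hfalse]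
        simp

-- ===== right side =====
theorem right_main (r rowL : List Char) (cp : Char) (m : Nat) (hlen : r.length = 8)
    (hL : rowL.length = 8) (hm : m < 8) (hdrop : rowL.drop m = r.drop m) :
    pvRightA r rowL cp m = pvRightB rowL cp m := by
  have hgetHi : ∀ i : Nat, m ≤ i → rowL.getD i '.' = r.getD i '.' :=
    fun i hi => getD_of_drop_eq hdrop hi '.'
  have hwalk : pvWalkR rowL cp (m + 1) (8 - (m + 1)) = pvWalkR r cp (m + 1) (8 - (m + 1)) :=
    pvWalkR_congr rowL r cp (8 - (m + 1)) (m + 1) (fun i hi => hgetHi i (by omega))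
  have hslen : (r.drop (m+1)).length = 8 - (m+1) := by
    simp [List.length_drop, hlen]
  have hgetDrop : ∀ p : Nat, p < 8 - (m+1) → (r.drop (m+1))[p]? = some (r.getD (m+1+p) '.') := by
    intro p hp
    rw [List.getElem?_drop, getD_getElem?_some r (m+1+p) (by omega)]
  have hff : PySem.Chars.findFrom r [cp] ((m:Int) + 1) none =
      (if PySem.Chars.find (r.drop (m+1)) [cp] = -1 then -1
       else ((m+1 : Nat) : Int) + PySem.Chars.find (r.drop (m+1)) [cp]) := by
    have hcast : ((m:Int) + 1) = ((m + 1 : Nat) : Int) := by push_cast; ring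
    rw [hcast, PySem.Chars.findFrom_natCast r [cp] (m+1) (by omega)]
  rcases pvWalkR_spec r cp (8 - (m + 1)) (m + 1) with ⟨hw, hall⟩ | ⟨k, hw, hk1, hk2, hstop, hall⟩
  · -- walked to the right edge: everything right of m is opponent, neither side flips
    have hA : PySem.Chars.find (r.drop (m+1)) [cp] = -1 := by
      by_contra hne
      have h0 : 0 ≤ PySem.Chars.find (r.drop (m+1)) [cp] := by
        have := PySem.Chars.neg_one_le_find (r.drop (m+1)) [cp]
        omega
      obtain ⟨hpre, -⟩ := PySem.Chars.find_spec h0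
      have hsome := prefix_singleton_drop.mp hpre
      obtain ⟨hlt, -⟩ := List.getElem?_eq_some_iff.mp hsome
      set p := (PySem.Chars.find (r.drop (m+1)) [cp]).toNat with hp
      have hplt : p < 8 - (m+1) := by omega
      rw [hgetDrop p hplt] at hsome
      have hcp : r.getD (m+1+p) '.' = cp := by injection hsome
      exact (hall (m+1+p) (by omega) (by omega)) (Or.inr hcp)
    have hBguard : ((pvWalkR rowL cp (m + 1) (8 - (m + 1)) < 8 : Bool) && (rowL.getD (pvWalkR rowL cp (m + 1) (8 - (m + 1))) '.' == cp)) = false := by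
      have h1 : pvWalkR rowL cp (m + 1) (8 - (m + 1)) = 8 := by rw [hwalk, hw]; omega
      rw [h1]
      simp
    rw [pvRightA, pvRightB, hff, hA]
    simp only [hBguard]
    simp
  · have hk8 : k < 8 := by omega
    by_cases hc : r.getD k '.' = cp
    · -- walk stopped on own piece at k: both flip (m, k)
      have hsk : (r.drop (m+1))[k - (m+1)]? = some cp := by
        rw [hgetDrop (k - (m+1)) (by omega)]
        have : m + 1 + (k - (m+1)) = k := by omega
        rw [this, hc]
      have hinf : PySem.Chars.isIn [cp] (r.drop (m+1)) = true := by
        rw [← PySem.Chars.exists_prefix_drop_iff_isIn]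
        exact ⟨k - (m+1), prefix_singleton_drop.mpr hsk⟩
      have h0 : 0 ≤ PySem.Chars.find (r.drop (m+1)) [cp] := by
        rw [PySem.Chars.find_nonneg_iff]
        exact (PySem.Chars.isIn_iff_infix [cp] (r.drop (m+1))).mp hinf
      obtain ⟨hpre, hmin⟩ := PySem.Chars.find_spec h0
      set fd := PySem.Chars.find (r.drop (m+1)) [cp] with hfd
      have hfle : fd.toNat ≤ k - (m+1) := by
        by_contra hgt
        exact (hmin (k - (m+1)) (by omega)) (prefix_singleton_drop.mpr hsk)
      have hfge : ¬(fd.toNat < k - (m+1)) := by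
        intro hlt2
        have hsome := prefix_singleton_drop.mp hpre
        rw [hgetDrop fd.toNat (by omega)] at hsome
        have hcp : r.getD (m+1+fd.toNat) '.' = cp := by injection hsome
        exact (hall (m+1+fd.toNat) (by omega) (by omega)) (Or.inr hcp)
      have hfeq : fd = ((k - (m+1) : Nat) : Int) := by omega
      have hfr : PySem.Chars.findFrom r [cp] ((m:Int) + 1) none = ((k:Nat) : Int) := by
        rw [hff, if_neg (by omega : ¬(fd = -1)), hfeq]
        push_cast
        omega
      have hchunk : PySem.Chars.slice r (some ((m:Int) + 1)) (some ((k:Nat) : Int)) = (r.drop (m+1)).take (k - (m+1)) := by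
        have hcast : ((m:Int) + 1) = ((m + 1 : Nat) : Int) := by push_cast; ring
        rw [hcast, PySem.Chars.slice_eq_listSlice, PySem.List.slice_natCast]
      have hallopp : (((r.drop (m+1)).take (k - (m+1))).all (fun c => !(c == '.' || c == cp))) = true := by
        rw [all_opp_iff r cp (m+1) (k - (m+1)) (by omega)]
        intro i h1 h2
        exact hall i h1 (by omega)
      have hclen : ((r.drop (m+1)).take (k - (m+1))).length = k - (m+1) := by
        simp only [List.length_take, List.length_drop]
        omega
      have hcL : rowL.getD k '.' = cp := by rw [hgetHi k (by omega), hc]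
      have hcL' : rowL[k]?.getD '.' = cp := by rw [← List.getD_eq_getElem?_getD]; exact hcL
      have hBguard : ((pvWalkR rowL cp (m + 1) (8 - (m + 1)) < 8 : Bool) && (rowL.getD (pvWalkR rowL cp (m + 1) (8 - (m + 1))) '.' == cp)) = true := by
        rw [hwalk, hw]
        simp [hk8, hcL']
      have hAval : pvSetSlice rowL ((m:Int) + 1) ((k:Nat) : Int) (List.replicate (k - (m+1)) cp)
          = rowL.take (m+1) ++ List.replicate (k - (m+1)) cp ++ rowL.drop k := by
        unfold pvSetSlice
        have h1 : ((m:Int) + 1).toNat = m + 1 := by omega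
        have h2 : ((k:Nat) : Int).toNat = k := by omega
        rw [h1, h2]
      have hBval : pvFlip rowL cp ((m:Int) + 1) ((k:Nat) : Int)
          = rowL.take (m+1) ++ List.replicate (k - (m+1)) cp ++ rowL.drop k := by
        have h1 : ((m:Int) + 1) = ((m + 1 : Nat) : Int) := by push_cast; ring
        have h2 : ((k:Nat) : Int) = (((m+1) + (k - (m+1)) : Nat) : Int) := by push_cast; omega
        rw [h1, h2, pvFlip_eq cp (k - (m+1)) (m+1) rowL (by omega)]
        have h3 : (m + 1) + (k - (m + 1)) = k := by omega
        rw [h3]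
      rw [pvRightA, pvRightB, hfr]
      rw [if_pos (by omega : ¬(((k:Nat) : Int) = -1))]
      rw [hchunk, if_pos hallopp, hclen, hAval]
      simp only [hBguard, if_true]
      rw [hwalk, hw, hBval]
    · -- walk stopped on an empty cell: neither side flips
      have hor : r.getD k '.' = '.' ∨ r.getD k '.' = cp := Decidable.not_not.mp hstop
      have hdot : r.getD k '.' = '.' := by
        rcases hor with h1 | h1
        · exact h1
        · exact absurd h1 hc
      have hne : ¬('.' = cp) := fun hcc => hc (hdot.trans hcc)
      have hcL : rowL.getD k '.' = '.' := by rw [hgetHi k (by omega), hdot]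
      have hcL' : rowL[k]?.getD '.' = '.' := by rw [← List.getD_eq_getElem?_getD]; exact hcL
      have hBguard : ((pvWalkR rowL cp (m + 1) (8 - (m + 1)) < 8 : Bool) && (rowL.getD (pvWalkR rowL cp (m + 1) (8 - (m + 1))) '.' == cp)) = false := by
        rw [hwalk, hw]
        simp [hcL', hne]
      have hBv : pvRightB rowL cp m = rowL := by
        rw [pvRightB]
        simp only [hBguard]
        simp
      rw [hBv, pvRightA]
      by_cases hfd0 : PySem.Chars.find (r.drop (m+1)) [cp] = -1
      · rw [hff, if_pos hfd0]
        simp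
      · have h0 : 0 ≤ PySem.Chars.find (r.drop (m+1)) [cp] := by
          have := PySem.Chars.neg_one_le_find (r.drop (m+1)) [cp]
          omega
        obtain ⟨hpre, -⟩ := PySem.Chars.find_spec h0
        set fd := PySem.Chars.find (r.drop (m+1)) [cp] with hfd
        have hsome := prefix_singleton_drop.mp hpre
        obtain ⟨hlt, -⟩ := List.getElem?_eq_some_iff.mp hsome
        have hplt : fd.toNat < 8 - (m+1) := by omega
        rw [hgetDrop fd.toNat hplt] at hsome
        have hcp : r.getD (m+1+fd.toNat) '.' = cp := by injection hsome
        have hgtk : k < m+1+fd.toNat := by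
          rcases Nat.lt_trichotomy (m+1+fd.toNat) k with hlt2 | heq | hgt
          · exact absurd hcp (fun hx => (hall (m+1+fd.toNat) (by omega) hlt2) (Or.inr hx))
          · exact absurd hcp (heq ▸ hc)
          · exact hgt
        have hfrv : PySem.Chars.findFrom r [cp] ((m:Int) + 1) none = ((m+1+fd.toNat : Nat) : Int) := by
          rw [hff, if_neg hfd0]
          push_cast
          omega
        have hchunk : PySem.Chars.slice r (some ((m:Int) + 1)) (some ((m+1+fd.toNat : Nat) : Int)) = (r.drop (m+1)).take (fd.toNat) := by
          have hcast : ((m:Int) + 1) = ((m + 1 : Nat) : Int) := by push_cast; ring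
          rw [hcast, PySem.Chars.slice_eq_listSlice, PySem.List.slice_natCast]
          have : m + 1 + fd.toNat - (m + 1) = fd.toNat := by omega
          rw [this]
        have hfalse : (((r.drop (m+1)).take (fd.toNat)).all (fun c => !(c == '.' || c == cp))) = false := by
          rw [← Bool.not_eq_true]
          intro htrue
          rw [all_opp_iff r cp (m+1) fd.toNat (by omega)] at htrue
          exact (htrue k (by omega) (by omega)) (Or.inl hdot)
        rw [hfrv, if_pos (by omega : ¬(((m+1+fd.toNat : Nat) : Int) = -1)), hchunk, hfalse]
        simp

-- ===== assembling the per-move and whole-fold equivalences =====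
theorem step_eq (row : List Char) (cp : Char) (move : Int)
    (hlen : row.length = 8) (h0 : 0 ≤ move) (h8 : move < 8) :
    pvStepA row cp move = pvStepB row cp move := by
  obtain ⟨m, rfl⟩ : ∃ m : Nat, move = (m : Int) := ⟨move.toNat, (Int.toNat_of_nonneg h0).symm⟩
  have hm8 : m < 8 := by exact_mod_cast h8
  have hrlen : (row.set m cp).length = 8 := by simp [hlen]
  obtain ⟨hAB, hdrop, hlenL⟩ := left_main (row.set m cp) cp m hrlen (by omega)
  rw [stepA_decomp, stepB_decomp, hAB]
  exact right_main (row.set m cp) (pvLeftB (row.set m cp) cp m) cp m hrlen hlenL hm8 hdrop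

theorem length_ite_flip (b : Bool) (r : List Char) (cp : Char) (a c : Int) :
    (if b then pvFlip r cp a c else r).length = r.length := by
  cases b <;> simp [pvFlip_length]

theorem pvStepB_length (row : List Char) (cp : Char) (move : Int) :
    (pvStepB row cp move).length = row.length := by
  simp only [pvStepB]
  rw [length_ite_flip, length_ite_flip, PySem.List.length_pySetD]

theorem parity_cond (i : Nat) : (((i : Int) % 2 == 0) : Bool) = ((i % 2 == 0) : Bool) := by
  rcases Nat.even_or_odd i with ⟨c, hc⟩ | ⟨c, hc⟩ <;> subst hc <;> (simp; try omega)

theorem fold_eq : ∀ (moves : List Int) (row : List Char) (i : Nat),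
    row.length = 8 → (∀ m ∈ moves, 0 ≤ m ∧ m < 8) →
    (moves.foldl (fun (st : List Char × Nat) move =>
        (pvStepA st.1 (if st.2 % 2 == 0 then '*' else 'O') move, st.2 + 1)) (row, i)).1
    = (PySem.List.enumerate moves (i : Int)).foldl
        (fun rw p => pvStepB rw (if p.1 % 2 == 0 then '*' else 'O') p.2) row
  | [], row, i, _, _ => by simp [PySem.List.enumerate]
  | mv :: rest, row, i, hlen, hpre => by
    have hmv := hpre mv (List.mem_cons_self)
    have hcp : pvStepA row (if (i : Nat) % 2 == 0 then '*' else 'O') mv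
        = pvStepB row (if (i : Nat) % 2 == 0 then '*' else 'O') mv :=
      step_eq row _ mv hlen hmv.1 hmv.2
    have hlen2 : (pvStepB row (if (i : Nat) % 2 == 0 then '*' else 'O') mv).length = 8 := by
      rw [pvStepB_length, hlen]
    have hIH := fold_eq rest (pvStepB row (if (i : Nat) % 2 == 0 then '*' else 'O') mv) (i + 1)
      hlen2 (fun m hmem => hpre m (List.mem_cons_of_mem mv hmem))
    simp only [List.foldl_cons, PySem.List.enumerate, hcp, parity_cond]
    have hcast : ((i:Int) + 1) = ((i + 1 : Nat) : Int) := by push_cast; ring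
    rw [hcast]
    exact hIH

theorem reversi_row_spec : Claim_equal_reversi_row := by
  intro moves _hdom hpre
  have h := fold_eq moves (List.replicate 8 '.') 0 (by simp) hpre
  simp only [Nat.cast_zero] at h
  simp only [Spec_reversi_row, reversi_row, reversi_row_alt]
  rw [h]
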